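-- pv_equiv track=rewrite | github.com/buildcb/VF-Detector | VCC/preprocess_variant_3.py | get_hunk_from_diff
-- ===== SOURCE A (Python) =====
-- def hunk_empty(hunk):
--     if hunk.strip() == '':
--         return True
--
--     for line in hunk.split('\n'):
--         if line[1:].strip() != '':
--             return False
--
--     return True
--
-- def get_hunk_from_diff(diff):
--     hunk_list = []
--     hunk = ''
--     for line in diff.split('\n'):
--         if line.startswith(('+', '-')):
--             hunk = hunk + line + '\n'
--         else:
--             if not hunk_empty(hunk):    # finish a hunk
--                 hunk = hunk[:-1]
--                 hunk_list.append(hunk)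
--                 hunk = ''
--
--     if not hunk_empty(hunk):
--         hunk_list.append(hunk)
--
--     return hunk_list
-- ===== SOURCE B (Python) =====
-- def get_hunk_from_diff(diff):
--     # One pass: keep the pending run as a list of lines plus a "has content" flag,
--     # instead of a growing string rescanned by hunk_empty at every separator line.
--     hunks = []
--     pending = []
--     nonblank = False
--     for line in diff.split('\n'):
--         if line.startswith(('+', '-')):
--             pending.append(line)
--             nonblank = nonblank or bool(line[1:].strip())
--         elif nonblank:
--             hunks.append('\n'.join(pending))
--             pending = []
--             nonblank = False
--     if nonblank:
--         hunks.append('\n'.join(pending) + '\n')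
--     return hunks
-- ===== Notes on version B (the rewrite author's own statement) =====
-- stated objective: alternative
-- what changed: Instead of accumulating the hunk as one string and re-scanning it with hunk_empty (strip plus a fresh split) at every non-diff line and at the end, B keeps the pending run as a list of lines together with a boolean flag for whether any pending line has non-blank content after its first character, maintained incrementally, and builds each emitted hunk with a single join.
import Mathlib
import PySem

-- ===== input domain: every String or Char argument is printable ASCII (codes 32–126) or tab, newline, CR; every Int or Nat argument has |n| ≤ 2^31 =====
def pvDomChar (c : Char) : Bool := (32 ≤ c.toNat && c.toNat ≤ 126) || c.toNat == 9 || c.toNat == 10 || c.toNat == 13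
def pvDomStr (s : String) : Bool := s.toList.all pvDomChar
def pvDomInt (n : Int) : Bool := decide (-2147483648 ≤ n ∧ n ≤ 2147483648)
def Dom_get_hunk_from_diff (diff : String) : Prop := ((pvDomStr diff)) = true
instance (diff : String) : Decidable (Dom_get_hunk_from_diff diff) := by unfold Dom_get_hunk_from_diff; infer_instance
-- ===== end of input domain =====

-- B replaces A's string accumulator (re-scanned by hunk_empty at every separator line) by a
-- list of pending lines plus an incrementally maintained "has non-blank content" flag.

-- ===== PORT A =====
-- the 'for line in hunk.split('\n')' loop of hunk_empty
def pvHunkEmptyLines : List (List Char) → Bool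
  | [] => true
  | l :: ls =>
    if PySem.Chars.strip (PySem.Chars.slice l (some 1) none) ≠ [] then false
    else pvHunkEmptyLines ls

def pvHunkEmpty (hunk : List Char) : Bool :=
  if PySem.Chars.strip hunk = [] then true
  else pvHunkEmptyLines (PySem.Chars.splitOn hunk ['\n'])

-- body of A's 'for line in diff.split('\n')' loop; state = (hunk_list, hunk)
def pvStepA (st : List (List Char) × List Char) (line : List Char) :
    List (List Char) × List Char :=
  if PySem.Chars.startswith line ['+'] || PySem.Chars.startswith line ['-'] then
    (st.1, st.2 ++ line ++ ['\n'])
  else if !pvHunkEmpty st.2 then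
    (st.1 ++ [PySem.Chars.slice st.2 none (some (-1))], [])
  else st

-- A's code after the loop
def pvFinishA (st : List (List Char) × List Char) : List String :=
  (if !pvHunkEmpty st.2 then st.1 ++ [st.2] else st.1).map String.ofList

def get_hunk_from_diff (diff : String) : List String :=
  pvFinishA ((PySem.Chars.splitOn diff.toList ['\n']).foldl pvStepA ([], []))

-- ===== PORT B =====
-- bool(line[1:].strip())
def pvNonblankLine (line : List Char) : Bool :=
  !(PySem.Chars.strip (PySem.Chars.slice line (some 1) none)).isEmpty

-- body of B's loop; state = (hunks, pending, nonblank)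
def pvStepB (st : List (List Char) × List (List Char) × Bool) (line : List Char) :
    List (List Char) × List (List Char) × Bool :=
  if PySem.Chars.startswith line ['+'] || PySem.Chars.startswith line ['-'] then
    (st.1, st.2.1 ++ [line], st.2.2 || pvNonblankLine line)
  else if st.2.2 then
    (st.1 ++ [PySem.Chars.join ['\n'] st.2.1], [], false)
  else st

-- B's code after the loop
def pvFinishB (st : List (List Char) × List (List Char) × Bool) : List String :=
  (if st.2.2 then st.1 ++ [PySem.Chars.join ['\n'] st.2.1 ++ ['\n']] else st.1).map String.ofList

def get_hunk_from_diff_alt (diff : String) : List String :=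
  pvFinishB ((PySem.Chars.splitOn diff.toList ['\n']).foldl pvStepB ([], [], false))

-- ===== PRECONDITION & SPEC =====
def Spec_get_hunk_from_diff (diff : String) (out : List String) : Prop := out = get_hunk_from_diff_alt diff
instance (diff : String) (out : List String) : Decidable (Spec_get_hunk_from_diff diff out) := by unfold Spec_get_hunk_from_diff; infer_instance

-- ===== CLAIM (what is proved, stated in full; the proofs are below) =====
def Claim_equal_get_hunk_from_diff : Prop := ∀ (diff : String), Dom_get_hunk_from_diff diff → Spec_get_hunk_from_diff diff (get_hunk_from_diff diff)

-- ===== LEMMAS AND PROOFS =====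

-- simple recursive characterisation of splitting on a single '\n'
def pvSplitNl : List Char → List (List Char)
  | [] => [[]]
  | c :: rest => if c = '\n' then [] :: pvSplitNl rest else (pvSplitNl rest).modifyHead (c :: ·)

theorem pvSplitNl_ne_nil (s : List Char) : pvSplitNl s ≠ [] := by
  induction s with
  | nil => simp [pvSplitNl]
  | cons c rest ih =>
    simp only [pvSplitNl]
    split
    · simp
    · intro h; exact ih (by simpa using List.modifyHead_eq_nil_iff.mp h)

theorem pv_go_eq : ∀ (fuel : Nat) (l cur : List Char) (acc : List (List Char)),
    l.length < fuel →
    PySem.Chars.splitOn.go ['\n'] fuel l cur acc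
      = acc.reverse ++ (pvSplitNl l).modifyHead (cur.reverse ++ ·) := by
  intro fuel
  induction fuel with
  | zero => intro l cur acc h; omega
  | succ f ih =>
    intro l cur acc h
    match l with
    | [] => simp [PySem.Chars.splitOn.go, pvSplitNl]
    | c :: rest =>
      by_cases hc : c = '\n'
      · subst hc
        rw [show PySem.Chars.splitOn.go ['\n'] (f+1) ('\n' :: rest) cur acc
              = PySem.Chars.splitOn.go ['\n'] f (List.drop 1 ('\n' :: rest)) [] (cur.reverse :: acc) by
            simp [PySem.Chars.splitOn.go, List.isPrefixOf]]
        rw [ih _ _ _ (by simpa using Nat.lt_of_succ_lt_succ h)]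
        simp only [pvSplitNl, List.reverse_cons, List.append_assoc,
          List.singleton_append, List.drop_succ_cons, List.drop_zero]
        cases pvSplitNl rest <;> simp
      · rw [show PySem.Chars.splitOn.go ['\n'] (f+1) (c :: rest) cur acc
              = PySem.Chars.splitOn.go ['\n'] f rest (c :: cur) acc by
            simp only [PySem.Chars.splitOn.go, List.isPrefixOf]
            rw [if_neg]
            simp only [Bool.and_eq_true, beq_iff_eq]
            rintro ⟨h1, -⟩
            exact hc h1.symm]
        rw [ih _ _ _ (by simpa using Nat.lt_of_succ_lt_succ h)]
        simp only [pvSplitNl, if_neg hc]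
        obtain ⟨h0, t, ht⟩ : ∃ h0 t, pvSplitNl rest = h0 :: t := by
          cases hr : pvSplitNl rest with
          | nil => exact absurd hr (pvSplitNl_ne_nil rest)
          | cons a b => exact ⟨a, b, rfl⟩
        simp [ht]

theorem pvSplitOn_eq (s : List Char) : PySem.Chars.splitOn s ['\n'] = pvSplitNl s := by
  rw [PySem.Chars.splitOn, pv_go_eq (s.length + 1) s [] [] (by omega)]
  cases h : pvSplitNl s with
  | nil => exact absurd h (pvSplitNl_ne_nil s)
  | cons a b => simp

theorem pvSplitNl_no_nl (s : List Char) : ∀ p ∈ pvSplitNl s, '\n' ∉ p := by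
  induction s with
  | nil => simp [pvSplitNl]
  | cons c rest ih =>
    simp only [pvSplitNl]
    split
    · intro p hp
      rcases List.mem_cons.mp hp with h | h
      · simp [h]
      · exact ih p h
    · rename_i hc
      obtain ⟨h0, t, ht⟩ : ∃ h0 t, pvSplitNl rest = h0 :: t := by
        cases hr : pvSplitNl rest with
        | nil => exact absurd hr (pvSplitNl_ne_nil rest)
        | cons a b => exact ⟨a, b, rfl⟩
      rw [ht]
      intro p hp
      rcases List.mem_cons.mp hp with h | h
      · subst h
        have := ih h0 (by rw [ht]; exact List.mem_cons_self)
        simp only [List.mem_cons]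
        rintro (rfl | hmem)
        · exact hc rfl
        · exact this hmem
      · exact ih p (by rw [ht]; exact List.mem_cons_of_mem _ h)

theorem pvSplitNl_append (a r : List Char) (h : '\n' ∉ a) :
    pvSplitNl (a ++ '\n' :: r) = a :: pvSplitNl r := by
  induction a with
  | nil => simp [pvSplitNl]
  | cons c rest ih =>
    simp only [List.mem_cons, not_or] at h
    have hc : ¬ c = '\n' := fun hc => h.1 hc.symm
    simp [pvSplitNl, hc, ih h.2]

-- the hunk string A accumulates for a pending run of lines
def pvHunkOf (p : List (List Char)) : List Char := (p.map (· ++ ['\n'])).flatten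

theorem pvHunkOf_append (p : List (List Char)) (l : List Char) :
    pvHunkOf (p ++ [l]) = pvHunkOf p ++ l ++ ['\n'] := by
  simp [pvHunkOf]

theorem pvSplitNl_hunkOf (p : List (List Char)) (h : ∀ l ∈ p, '\n' ∉ l) :
    pvSplitNl (pvHunkOf p) = p ++ [[]] := by
  induction p with
  | nil => simp [pvHunkOf, pvSplitNl]
  | cons l ls ih =>
    have hh : pvHunkOf (l :: ls) = l ++ '\n' :: pvHunkOf ls := by simp [pvHunkOf]
    rw [hh, pvSplitNl_append l _ (h l List.mem_cons_self),
      ih (fun x hx => h x (List.mem_cons_of_mem _ hx))]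
    simp

theorem pvStrip_eq_nil_iff (cs : List Char) :
    PySem.Chars.strip cs = [] ↔ ∀ c ∈ cs, PySem.Chars.isspace c := by
  constructor
  · intro h c hc
    by_contra hw
    have hl : ∀ c ∈ PySem.Chars.lstrip cs, PySem.Chars.isspace c := by
      have := h
      simp only [PySem.Chars.strip, PySem.Chars.rstrip, List.reverse_eq_nil_iff,
        List.dropWhile_eq_nil_iff, List.mem_reverse] at this
      exact this
    have hc2 : c ∈ List.takeWhile PySem.Chars.isspace cs ++ List.dropWhile PySem.Chars.isspace cs := by
      rw [List.takeWhile_append_dropWhile]; exact hc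
    rcases List.mem_append.mp hc2 with hm | hm
    · exact hw (List.mem_takeWhile_imp hm)
    · exact hw (hl c hm)
  · intro h
    have hl : PySem.Chars.lstrip cs = [] := by
      simp only [PySem.Chars.lstrip, List.dropWhile_eq_nil_iff]
      exact h
    simp [PySem.Chars.strip, hl, PySem.Chars.rstrip]

theorem pvIsEmpty_eq_decide (x : List Char) : x.isEmpty = decide (x = []) := by
  cases x <;> simp

theorem pvHunkEmptyLines_eq (ls : List (List Char)) :
    pvHunkEmptyLines ls = ls.all (fun l => !pvNonblankLine l) := by
  induction ls with
  | nil => simp [pvHunkEmptyLines]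
  | cons l ls ih =>
    by_cases h : PySem.Chars.strip (PySem.Chars.slice l (some 1) none) = [] <;>
      simp [pvHunkEmptyLines, ih, pvNonblankLine, pvIsEmpty_eq_decide]

theorem pvNonblankLine_tail (l : List Char) :
    pvNonblankLine l = !(PySem.Chars.strip l.tail).isEmpty := by
  have hs : PySem.Chars.slice l (some 1) none = l.tail := by
    simp only [PySem.Chars.slice_eq_listSlice]
    exact PySem.List.slice_from_one l
  rw [pvNonblankLine, hs]

theorem pvHunkEmpty_eq (p : List (List Char)) (h : ∀ l ∈ p, '\n' ∉ l) :
    pvHunkEmpty (pvHunkOf p) = p.all (fun l => !pvNonblankLine l) := by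
  by_cases hs : PySem.Chars.strip (pvHunkOf p) = []
  · rw [pvHunkEmpty, if_pos hs]
    have hws := (pvStrip_eq_nil_iff _).mp hs
    symm
    simp only [List.all_eq_true]
    intro l hl
    simp only [pvNonblankLine_tail, Bool.not_not, List.isEmpty_iff, pvStrip_eq_nil_iff]
    intro c hc
    refine hws c ?_
    simp only [pvHunkOf, List.mem_flatten]
    exact ⟨l ++ ['\n'], List.mem_map_of_mem hl, List.mem_append_left _ (List.mem_of_mem_tail hc)⟩
  · rw [pvHunkEmpty, if_neg hs, pvSplitOn_eq, pvSplitNl_hunkOf p h, pvHunkEmptyLines_eq,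
      List.all_append]
    simp [show (!pvNonblankLine []) = true from by decide]

theorem pvHunkOf_eq_join (p : List (List Char)) (hp : p ≠ []) :
    pvHunkOf p = PySem.Chars.join ['\n'] p ++ ['\n'] := by
  induction p with
  | nil => exact absurd rfl hp
  | cons l ls ih =>
    cases ls with
    | nil => simp [pvHunkOf, PySem.Chars.join, List.intercalate]
    | cons l' ls' =>
      have hh : pvHunkOf (l :: l' :: ls') = l ++ '\n' :: pvHunkOf (l' :: ls') := by simp [pvHunkOf]
      rw [hh, ih (by simp)]
      simp [PySem.Chars.join, List.intercalate, List.intersperse]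

theorem pvHunkOf_dropLast (p : List (List Char)) (hp : p ≠ []) :
    (pvHunkOf p).dropLast = PySem.Chars.join ['\n'] p := by
  rw [pvHunkOf_eq_join p hp]
  simp

-- the loop invariant: A's state is B's state with pending rendered as a string,
-- and B's flag says "pending has a non-blank line"
theorem pv_loop_inv (lines : List (List Char)) :
    (∀ l ∈ lines, '\n' ∉ l) →
    ∀ (acc p : List (List Char)), (∀ l ∈ p, '\n' ∉ l) →
    (lines.foldl pvStepA (acc, pvHunkOf p)
        = ((lines.foldl pvStepB (acc, p, !p.all (fun l => !pvNonblankLine l))).1,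
           pvHunkOf (lines.foldl pvStepB (acc, p, !p.all (fun l => !pvNonblankLine l))).2.1))
    ∧ (lines.foldl pvStepB (acc, p, !p.all (fun l => !pvNonblankLine l))).2.2
        = !(lines.foldl pvStepB (acc, p, !p.all (fun l => !pvNonblankLine l))).2.1.all
            (fun l => !pvNonblankLine l)
    ∧ ∀ l ∈ (lines.foldl pvStepB (acc, p, !p.all (fun l => !pvNonblankLine l))).2.1, '\n' ∉ l := by
  induction lines with
  | nil =>
    intro _ acc p hp
    exact ⟨rfl, rfl, hp⟩
  | cons line rest ih =>
    intro hl acc p hp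
    have hline : '\n' ∉ line := hl line List.mem_cons_self
    have hrest : ∀ l ∈ rest, '\n' ∉ l := fun l h => hl l (List.mem_cons_of_mem _ h)
    simp only [List.foldl_cons]
    by_cases hpm : PySem.Chars.startswith line ['+'] || PySem.Chars.startswith line ['-']
    · -- diff line: append to pending
      have hA : pvStepA (acc, pvHunkOf p) line = (acc, pvHunkOf (p ++ [line])) := by
        rw [pvStepA, if_pos hpm, pvHunkOf_append]
      have hB : pvStepB (acc, p, !p.all (fun l => !pvNonblankLine l)) line
          = (acc, p ++ [line], !(p ++ [line]).all (fun l => !pvNonblankLine l)) := by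
        rw [pvStepB, if_pos hpm]
        simp [List.all_append]
      rw [hA, hB]
      exact ih hrest acc (p ++ [line])
        (fun l h => by
          rcases List.mem_append.mp h with h | h
          · exact hp l h
          · simp only [List.mem_singleton] at h; subst h; exact hline)
    · by_cases hall : p.all (fun l => !pvNonblankLine l)
      · -- blank pending: neither side changes state
        have hA : pvStepA (acc, pvHunkOf p) line = (acc, pvHunkOf p) := by
          rw [pvStepA, if_neg hpm, pvHunkEmpty_eq p hp, hall]
          simp
        have hB : pvStepB (acc, p, !p.all (fun l => !pvNonblankLine l)) line
            = (acc, p, !p.all (fun l => !pvNonblankLine l)) := by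
          rw [pvStepB, if_neg hpm, hall]
          simp
        rw [hA, hB]
        exact ih hrest acc p hp
      · -- non-blank pending: both sides flush
        have hpne : p ≠ [] := by rintro rfl; simp at hall
        have hall' : p.all (fun l => !pvNonblankLine l) = false := by
          simpa using hall
        have hsl : PySem.Chars.slice (pvHunkOf p) none (some (-1))
            = PySem.Chars.join ['\n'] p := by
          simp only [PySem.Chars.slice_eq_listSlice, PySem.List.slice_to_neg_one]
          exact pvHunkOf_dropLast p hpne
        have hA : pvStepA (acc, pvHunkOf p) line
            = (acc ++ [PySem.Chars.join ['\n'] p], pvHunkOf []) := by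
          rw [pvStepA, if_neg hpm, pvHunkEmpty_eq p hp, hall', hsl]
          simp [pvHunkOf]
        have hB : pvStepB (acc, p, !p.all (fun l => !pvNonblankLine l)) line
            = (acc ++ [PySem.Chars.join ['\n'] p], [],
               !([] : List (List Char)).all (fun l => !pvNonblankLine l)) := by
          rw [pvStepB, if_neg hpm, hall']
          simp
        rw [hA, hB]
        exact ih hrest (acc ++ [PySem.Chars.join ['\n'] p]) [] (by simp)

-- the after-loop code agrees on corresponding states
theorem pv_finish_eq (stB : List (List Char) × List (List Char) × Bool)
    (hflag : stB.2.2 = !stB.2.1.all (fun l => !pvNonblankLine l))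
    (hnl : ∀ l ∈ stB.2.1, '\n' ∉ l) :
    pvFinishA (stB.1, pvHunkOf stB.2.1) = pvFinishB stB := by
  rw [pvFinishA, pvFinishB, pvHunkEmpty_eq stB.2.1 hnl, ← hflag]
  by_cases hfl : stB.2.2
  · have hpne : stB.2.1 ≠ [] := by
      rintro hnil
      rw [hflag, hnil] at hfl
      simp at hfl
    rw [hfl, pvHunkOf_eq_join stB.2.1 hpne]
  · simp only [Bool.not_eq_true] at hfl
    rw [hfl]
    simp

-- ===== VERDICT (by name: the statement is the Claim_ definition above) =====
theorem get_hunk_from_diff_spec : Claim_equal_get_hunk_from_diff := by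
  intro diff _
  unfold Spec_get_hunk_from_diff get_hunk_from_diff get_hunk_from_diff_alt
  have hlines : ∀ l ∈ PySem.Chars.splitOn diff.toList ['\n'], '\n' ∉ l := by
    rw [pvSplitOn_eq]
    exact pvSplitNl_no_nl diff.toList
  obtain ⟨h1, h2, h3⟩ := pv_loop_inv (PySem.Chars.splitOn diff.toList ['\n']) hlines [] []
    (by simp)
  have hA0 : (([] : List (List Char)), ([] : List Char))
      = (([] : List (List Char)), pvHunkOf []) := rfl
  have hB0 : (([] : List (List Char)), ([] : List (List Char)), false)
      = (([] : List (List Char)), ([] : List (List Char)),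
         !([] : List (List Char)).all (fun l => !pvNonblankLine l)) := rfl
  rw [hA0, hB0, h1]
  exact pv_finish_eq _ h2 h3
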